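-- pv_equiv track=rewrite | github.com/ChineseResearcher/l33tc0d3-dump | binary_search/Q2529 Maximum Count of Positive Integer and Negative Integer.py | maximumCount
-- ===== SOURCE A (Python) =====
-- def maximumCount(nums) -> int:
--     n = len(nums)
--     # we are given a nums arr. sorted in increasing order
--     # it is helpful to use binary search to locate the first neg/pos number
--
--     # find first pos
--     l, r = 0, n-1
--     first_pos = n
--     while l <= r:
--
--         mid = (l + r) // 2
--         if nums[mid] > 0:
--             first_pos = min(first_pos, mid)
--             r = mid - 1
--         else:
--             l = mid + 1
--
--     # find first neg
--     l, r = 0, n-1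
--     first_neg = -1
--     while l <= r:
--
--         mid = (l+r) // 2
--         if nums[mid] < 0:
--             first_neg = max(first_neg, mid)
--             l = mid + 1
--         else:
--             r = mid - 1
--
--     return max(first_neg-(-1), n-first_pos)
--
-- nums = [5,20,66,1314]
-- ===== SOURCE B (Python) =====
-- def maximumCount(nums) -> int:
--     pos = 0
--     neg = 0
--     for x in nums:
--         if x > 0:
--             pos += 1
--         elif x < 0:
--             neg += 1
--     return max(pos, neg)
-- ===== Notes on version B (the rewrite author's own statement) =====
-- stated objective: simpler
-- what changed: Replaces the two hand-written binary searches over boundary indices by a single linear scan that keeps two counters (positives and negatives) and returns their max.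
-- outside the precondition, e.g. on maximumCount([1, -1]): A returns 2, B returns 1
import Mathlib
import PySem

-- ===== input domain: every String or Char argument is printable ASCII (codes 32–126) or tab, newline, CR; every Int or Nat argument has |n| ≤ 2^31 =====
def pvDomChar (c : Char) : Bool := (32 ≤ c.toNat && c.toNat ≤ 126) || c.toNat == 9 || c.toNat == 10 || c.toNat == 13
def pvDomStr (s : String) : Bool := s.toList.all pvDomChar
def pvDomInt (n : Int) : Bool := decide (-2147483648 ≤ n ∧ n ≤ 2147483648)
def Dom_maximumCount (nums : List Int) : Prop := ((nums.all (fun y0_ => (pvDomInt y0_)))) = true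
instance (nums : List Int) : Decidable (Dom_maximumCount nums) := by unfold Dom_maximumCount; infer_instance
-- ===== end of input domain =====

-- B replaces A's two binary searches by one linear scan with two counters; objective: simpler.

-- ===== PORT A =====
-- first 'while l <= r' loop of A: locate the first positive index (state l, r, first_pos)
def pvLoop1 (nums : List Int) (l r fp : Int) : Int :=
  if h : l ≤ r then
    let mid := PySem.Int.floordiv (l + r) 2
    match PySem.List.pyGet? nums mid with
    | none => fp          -- IndexError; unreachable from maximumCount's call
    | some v =>
      if 0 < v then pvLoop1 nums l (mid - 1) (min fp mid)
      else pvLoop1 nums (mid + 1) r fp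
  else fp
termination_by (r + 1 - l).toNat
decreasing_by
  · have h2 := PySem.Int.floordiv_two_mid_bounds h
    omega
  · have h2 := PySem.Int.floordiv_two_mid_bounds h
    omega

-- second 'while l <= r' loop of A: locate the last negative index (state l, r, first_neg)
def pvLoop2 (nums : List Int) (l r fn : Int) : Int :=
  if h : l ≤ r then
    let mid := PySem.Int.floordiv (l + r) 2
    match PySem.List.pyGet? nums mid with
    | none => fn          -- IndexError; unreachable from maximumCount's call
    | some v =>
      if v < 0 then pvLoop2 nums (mid + 1) r (max fn mid)
      else pvLoop2 nums l (mid - 1) fn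
  else fn
termination_by (r + 1 - l).toNat
decreasing_by
  · have h2 := PySem.Int.floordiv_two_mid_bounds h
    omega
  · have h2 := PySem.Int.floordiv_two_mid_bounds h
    omega

def maximumCount (nums : List Int) : Int :=
  let n : Int := nums.length
  let first_pos := pvLoop1 nums 0 (n - 1) n
  let first_neg := pvLoop2 nums 0 (n - 1) (-1)
  max (first_neg - (-1)) (n - first_pos)

-- ===== PORT B =====
def maximumCount_alt (nums : List Int) : Int :=
  let pn := nums.foldl
    (fun (pn : Int × Int) x =>
      if 0 < x then (pn.1 + 1, pn.2)
      else if x < 0 then (pn.1, pn.2 + 1)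
      else pn)
    (0, 0)
  max pn.1 pn.2

-- ===== PRECONDITION & SPEC =====
-- Pre_ excludes lists that are not sorted by sign (a positive before a non-positive, or a
-- non-negative before a negative): A's comment states the input is "sorted in increasing order",
-- and on inputs whose signs are not monotone its binary searches return meaningless values.
def Pre_maximumCount (nums : List Int) : Prop :=
  List.Pairwise (fun a b => (0 < a → 0 < b) ∧ (b < 0 → a < 0)) nums
instance (nums : List Int) : Decidable (Pre_maximumCount nums) := by unfold Pre_maximumCount; infer_instance

def pvWitness_maximumCount : List Int := [-3, -1, 0, 2, 5]

def Spec_maximumCount (nums : List Int) (out : Int) : Prop := out = maximumCount_alt nums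
instance (nums : List Int) (out : Int) : Decidable (Spec_maximumCount nums out) := by unfold Spec_maximumCount; infer_instance

-- ===== CLAIM =====
def Claim_equal_maximumCount : Prop :=
  ∀ (nums : List Int), Dom_maximumCount nums → Pre_maximumCount nums →
    Spec_maximumCount nums (maximumCount nums)

-- ===== LEMMAS AND PROOFS =====
lemma countP_boundary (p : Int → Bool) :
    ∀ (nums : List Int) (k : Nat), k ≤ nums.length →
    (∀ i (h : i < nums.length), i < k → p nums[i]) →
    (∀ i (h : i < nums.length), k ≤ i → ¬ p nums[i]) →
    nums.countP p = k := by
  intro nums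
  induction nums with
  | nil => intro k hk _ _; simp at hk ⊢; omega
  | cons a t ih =>
    intro k hk h1 h2
    cases k with
    | zero =>
      rw [List.countP_eq_zero]
      intro x hx
      obtain ⟨i, hi, rfl⟩ := List.mem_iff_getElem.mp hx
      exact h2 i hi (Nat.zero_le i)
    | succ k' =>
      have ha : p a := h1 0 (by simp) (Nat.succ_pos k')
      rw [List.countP_cons, if_pos ha]
      have ht : t.countP p = k' := by
        apply ih k' (by simpa using hk)
        · intro i hi hik
          simpa using h1 (i + 1) (by simpa using hi) (by omega)
        · intro i hi hik
          simpa using h2 (i + 1) (by simpa using hi) (by omega)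
      omega

lemma pvLoop1_eq (nums : List Int)
    (hs : List.Pairwise (fun a b => (0 < a → 0 < b) ∧ (b < 0 → a < 0)) nums) :
    ∀ (m : Nat) (l r : Int), (r + 1 - l).toNat ≤ m → 0 ≤ l → r < nums.length → l ≤ r + 1 →
    (∀ i (h : i < nums.length), (i : Int) < l → nums[i] ≤ 0) →
    (∀ i (h : i < nums.length), r < (i : Int) → 0 < nums[i]) →
    pvLoop1 nums l r (r + 1) = nums.countP (fun x => decide (x ≤ 0)) := by
  have hP := List.pairwise_iff_getElem.mp hs
  intro m
  induction m with
  | zero =>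
    intro l r hm h0 hr hlr hl hr2
    have hnle : ¬ l ≤ r := by omega
    rw [pvLoop1, dif_neg hnle]
    have hcnt := countP_boundary (fun x => decide (x ≤ 0)) nums l.toNat (by omega)
      (fun i hi hik => by simpa using hl i hi (by omega))
      (fun i hi hik => by simpa using hr2 i hi (by omega))
    omega
  | succ m ih =>
    intro l r hm h0 hr hlr hl hr2
    by_cases hle : l ≤ r
    · rw [pvLoop1, dif_pos hle]
      have hmid := PySem.Int.floordiv_two_mid_bounds hle
      set mid := PySem.Int.floordiv (l + r) 2 with hmiddef
      have hmid0 : 0 ≤ mid := by omega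
      have hmidn : mid < nums.length := by omega
      have hget : PySem.List.pyGet? nums mid = some nums[mid.toNat] :=
        PySem.List.pyGet?_eq_some_getElem nums hmid0 hmidn
      simp only [hget]
      by_cases hpos : 0 < nums[mid.toNat]'(by omega)
      · rw [if_pos hpos]
        have hmin : min (r + 1) mid = (mid - 1) + 1 := by omega
        rw [hmin]
        apply ih l (mid - 1) (by omega) h0 (by omega) (by omega) hl
        intro i hi hii
        rcases Nat.lt_or_ge mid.toNat i with hlt | hge
        · exact (hP mid.toNat i (by omega) hi hlt).1 hpos
        · have : i = mid.toNat := by omega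
          subst this; exact hpos
      · rw [if_neg hpos]
        apply ih (mid + 1) r (by omega) (by omega) hr (by omega) _ hr2
        intro i hi hii
        rcases Nat.lt_or_ge i mid.toNat with hlt | hge
        · by_contra hc
          exact absurd ((hP i mid.toNat hi (by omega) hlt).1 (by omega)) (by omega)
        · have : i = mid.toNat := by omega
          subst this; omega
    · rw [pvLoop1, dif_neg hle]
      have hcnt := countP_boundary (fun x => decide (x ≤ 0)) nums l.toNat (by omega)
        (fun i hi hik => by simpa using hl i hi (by omega))
        (fun i hi hik => by simpa using hr2 i hi (by omega))
      omega

lemma pvLoop2_eq (nums : List Int)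
    (hs : List.Pairwise (fun a b => (0 < a → 0 < b) ∧ (b < 0 → a < 0)) nums) :
    ∀ (m : Nat) (l r : Int), (r + 1 - l).toNat ≤ m → 0 ≤ l → r < nums.length → l ≤ r + 1 →
    (∀ i (h : i < nums.length), (i : Int) < l → nums[i] < 0) →
    (∀ i (h : i < nums.length), r < (i : Int) → 0 ≤ nums[i]) →
    pvLoop2 nums l r (l - 1) = (nums.countP (fun x => decide (x < 0)) : Int) - 1 := by
  have hP := List.pairwise_iff_getElem.mp hs
  intro m
  induction m with
  | zero =>
    intro l r hm h0 hr hlr hl hr2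
    have hnle : ¬ l ≤ r := by omega
    rw [pvLoop2, dif_neg hnle]
    have hcnt := countP_boundary (fun x => decide (x < 0)) nums l.toNat (by omega)
      (fun i hi hik => by simpa using hl i hi (by omega))
      (fun i hi hik => by simpa using hr2 i hi (by omega))
    omega
  | succ m ih =>
    intro l r hm h0 hr hlr hl hr2
    by_cases hle : l ≤ r
    · rw [pvLoop2, dif_pos hle]
      have hmid := PySem.Int.floordiv_two_mid_bounds hle
      set mid := PySem.Int.floordiv (l + r) 2 with hmiddef
      have hmid0 : 0 ≤ mid := by omega
      have hmidn : mid < nums.length := by omega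
      have hget : PySem.List.pyGet? nums mid = some nums[mid.toNat] :=
        PySem.List.pyGet?_eq_some_getElem nums hmid0 hmidn
      simp only [hget]
      by_cases hneg : nums[mid.toNat]'(by omega) < 0
      · rw [if_pos hneg]
        have hmax : max (l - 1) mid = (mid + 1) - 1 := by omega
        rw [hmax]
        apply ih (mid + 1) r (by omega) (by omega) hr (by omega) _ hr2
        intro i hi hii
        rcases Nat.lt_or_ge i mid.toNat with hlt | hge
        · exact (hP i mid.toNat hi (by omega) hlt).2 hneg
        · have : i = mid.toNat := by omega
          subst this; exact hneg
      · rw [if_neg hneg]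
        apply ih l (mid - 1) (by omega) h0 (by omega) (by omega) hl
        intro i hi hii
        rcases Nat.lt_or_ge mid.toNat i with hlt | hge
        · by_contra hc
          exact absurd ((hP mid.toNat i (by omega) hi hlt).2 (by omega)) (by omega)
        · have : i = mid.toNat := by omega
          subst this; omega
    · rw [pvLoop2, dif_neg hle]
      have hcnt := countP_boundary (fun x => decide (x < 0)) nums l.toNat (by omega)
        (fun i hi hik => by simpa using hl i hi (by omega))
        (fun i hi hik => by simpa using hr2 i hi (by omega))
      omega

lemma foldB_eq :
    ∀ (nums : List Int) (p q : Int),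
    nums.foldl
      (fun (pn : Int × Int) x =>
        if 0 < x then (pn.1 + 1, pn.2)
        else if x < 0 then (pn.1, pn.2 + 1)
        else pn)
      (p, q)
    = (p + nums.countP (fun x => decide (0 < x)), q + nums.countP (fun x => decide (x < 0))) := by
  intro nums
  induction nums with
  | nil => intro p q; simp
  | cons a t ih =>
    intro p q
    by_cases h1 : 0 < a
    · simp only [List.foldl_cons, if_pos h1, ih, List.countP_cons]
      have : ¬ a < 0 := by omega
      simp [h1, this]
      ring
    · by_cases h2 : a < 0
      · simp only [List.foldl_cons, if_neg h1, if_pos h2, ih, List.countP_cons]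
        simp [h1, h2]
        ring
      · simp only [List.foldl_cons, if_neg h1, if_neg h2, ih, List.countP_cons]
        simp [h1, h2]

lemma count_split :
    ∀ nums : List Int,
    nums.countP (fun x => decide (x ≤ 0)) + nums.countP (fun x => decide (0 < x)) = nums.length := by
  intro nums
  induction nums with
  | nil => simp
  | cons a t ih =>
    by_cases h : a ≤ 0 <;> simp [h, (by omega : ¬ a ≤ 0 → 0 < a)] <;> omega

-- ===== VERDICT =====
theorem maximumCount_spec : Claim_equal_maximumCount := by
  intro nums _ hpre
  unfold Spec_maximumCount maximumCount maximumCount_alt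
  have h1 := pvLoop1_eq nums hpre ((nums.length : Int) - 1 + 1 - 0).toNat 0 ((nums.length : Int) - 1)
    (le_refl _) (le_refl 0) (by omega) (by omega)
    (fun i hi hii => by omega) (fun i hi hii => by omega)
  have h2 := pvLoop2_eq nums hpre ((nums.length : Int) - 1 + 1 - 0).toNat 0 ((nums.length : Int) - 1)
    (le_refl _) (le_refl 0) (by omega) (by omega)
    (fun i hi hii => by omega) (fun i hi hii => by omega)
  have hsplit := count_split nums
  simp only [foldB_eq, zero_add]
  have e1 : (nums.length : Int) - 1 + 1 = (nums.length : Int) := by omega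
  rw [show (0 : Int) - 1 = -1 by norm_num] at h2
  rw [e1] at h1
  rw [h1, h2]
  omega
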